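-- pv_equiv track=rewrite | github.com/wbjordammen98/Extra-Credit | dictonary_exercise1_p1.py | create_word_dict
-- ===== SOURCE A (Python) =====
-- def create_word_dict(file_lines):
--
--     # Counter variable to iterate through each line.
--     line_number = 1
--
--     # Create an empty dictionary to store each word in the txt file.
--     words_in_lines = {}
--
--     # For loop to interate through each line in the file.
--     for line in file_lines:
--
--         # Strips each line for the words and separates each word.
--         words = line.strip().lower().split()
--
--         # Runs a function to find the lines where each word is used.
--         find_word_lines(words,words_in_lines,line_number)
--
--         # Once a line is iterated through, this will move on to the next line.
--         line_number += 1
--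
--     # Return the dictionary.
--     return words_in_lines
--
-- def find_word_lines(words,words_in_lines,line_number):
--
--     # For loop go iterate through each word in each line.
--     for word in words:
--
--         # Conditional statement to indicate if a word is in a ceratain line,
--         # to add the line numbers where the word is present.
--         if word in words_in_lines:
--             words_in_lines[word].add(line_number)
--         else:
--             words_in_lines[word] = {line_number}
-- ===== SOURCE B (Python) =====
-- def create_word_dict(file_lines):
--     # Stage 1: split every line into its lowercase words.
--     word_lists = [line.strip().lower().split() for line in file_lines]
--     # Stage 2: for each word (at its first occurrence), scan ALL lines at once
--     # and record every line number containing it.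
--     words_in_lines = {}
--     for words in word_lists:
--         for word in words:
--             if word not in words_in_lines:
--                 words_in_lines[word] = {i for i, ws in enumerate(word_lists, 1) if word in ws}
--     return words_in_lines
-- ===== Notes on version B (the rewrite author's own statement) =====
-- stated objective: alternative
-- what changed: Replaces A's single-pass accumulator (helper mutating the dict, manual line counter, per-word set insertion) with a two-stage brute-force search: first split all lines into word lists, then for each word at its first occurrence build its whole line-number set in one scan over all lines with a set comprehension.
import Mathlib
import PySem

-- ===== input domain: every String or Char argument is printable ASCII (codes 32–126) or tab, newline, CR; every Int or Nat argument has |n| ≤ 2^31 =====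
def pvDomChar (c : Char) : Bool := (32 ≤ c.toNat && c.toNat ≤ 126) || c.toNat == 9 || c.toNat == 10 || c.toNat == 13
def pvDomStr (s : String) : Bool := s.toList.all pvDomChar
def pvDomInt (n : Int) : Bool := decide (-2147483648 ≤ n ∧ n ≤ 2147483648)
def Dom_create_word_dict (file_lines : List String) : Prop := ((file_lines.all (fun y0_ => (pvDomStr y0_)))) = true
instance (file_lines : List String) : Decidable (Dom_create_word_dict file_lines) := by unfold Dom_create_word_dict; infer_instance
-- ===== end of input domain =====

-- B replaces A's single-pass accumulator (helper + manual line counter) with a two-stage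
-- brute-force search: split all lines first, then for each first-seen word collect its
-- whole line-number set in one scan over all lines (objective: alternative; not faster).

-- ===== PORT A =====
-- helper find_word_lines: for each word, add line_number to its set (if/else on membership)
def find_word_lines (words : List String) (words_in_lines : PySem.Dict String (PySem.Set Int))
    (line_number : Int) : PySem.Dict String (PySem.Set Int) :=
  words.foldl (fun d word =>
    if d.contains word then
      d.modify word PySem.Set.empty (fun s => PySem.Set.add s line_number)
    else
      d.insert word (PySem.Set.add PySem.Set.empty line_number)) words_in_lines

def create_word_dict (file_lines : List String) : List (String × List Int) :=
  -- line_number = 1; words_in_lines = {}; loop over lines, incrementing the counter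
  (file_lines.foldl (fun (st : PySem.Dict String (PySem.Set Int) × Int) line =>
      let words := PySem.Str.split₀ (PySem.Str.lower (PySem.Str.strip line))
      (find_word_lines words st.1 st.2, st.2 + 1))
    (PySem.Dict.empty, 1)).1.items

-- ===== PORT B =====
def create_word_dict_alt (file_lines : List String) : List (String × List Int) :=
  -- word_lists = [line.strip().lower().split() for line in file_lines]
  let word_lists := file_lines.map (fun line => PySem.Str.split₀ (PySem.Str.lower (PySem.Str.strip line)))
  -- for words in word_lists: for word in words: if word not in dict:
  --   dict[word] = {i for i, ws in enumerate(word_lists, 1) if word in ws}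
  (word_lists.foldl (fun d words =>
      words.foldl (fun d word =>
        if d.contains word then d
        else d.insert word (PySem.Set.ofList
          (((PySem.List.enumerate word_lists 1).filter (fun p => p.2.contains word)).map (·.1)))) d)
    PySem.Dict.empty).items

-- ===== PRECONDITION & SPEC =====
def Spec_create_word_dict (file_lines : List String) (out : List (String × List Int)) : Prop := out = create_word_dict_alt file_lines
instance (file_lines : List String) (out : List (String × List Int)) : Decidable (Spec_create_word_dict file_lines out) := by unfold Spec_create_word_dict; infer_instance

-- ===== CLAIM (what is proved, stated in full; the proofs are below) =====
def Claim_equal_create_word_dict : Prop := ∀ (file_lines : List String), Dom_create_word_dict file_lines → Spec_create_word_dict file_lines (create_word_dict file_lines)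

-- ===== LEMMAS AND PROOFS =====

-- line → its lowercase words (shared shape of both ports)
def pvWordsOf (line : String) : List String :=
  PySem.Str.split₀ (PySem.Str.lower (PySem.Str.strip line))

-- the canonical value both programs end up storing at word k
def pvOcc (wls : List (List String)) (k : String) : List Int :=
  PySem.Set.ofList (((PySem.List.enumerate wls 1).filter (fun p => p.2.contains k)).map (·.1))

-- B's per-word step, over the fixed full word_lists
def pvStepB (wls : List (List String)) (d : PySem.Dict String (PySem.Set Int)) (word : String) :
    PySem.Dict String (PySem.Set Int) :=
  if d.contains word then d
  else d.insert word (PySem.Set.ofList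
    (((PySem.List.enumerate wls 1).filter (fun p => p.2.contains word)).map (·.1)))

-- basic dict facts used below
theorem pv_contains_iff_mem_keys (d : PySem.Dict String (PySem.Set Int)) (k : String) :
    d.contains k = true ↔ k ∈ d.keys := by
  simp [PySem.Dict.contains, PySem.Dict.keys, List.any_eq_true]

theorem pv_getD_of_not_contains (d : PySem.Dict String (PySem.Set Int)) (k : String)
    (v : PySem.Set Int) (h : d.contains k = false) : d.getD k v = v := by
  have hf : List.find? (fun p => p.1 == k) d.items = none := by
    apply List.find?_eq_none.mpr
    intro p hp
    have := List.any_eq_false.mp h p hp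
    simpa using this
  simp [PySem.Dict.getD, PySem.Dict.get?, hf]

theorem pv_get?_eq_none_iff (d : PySem.Dict String (PySem.Set Int)) (k : String) :
    d.get? k = none ↔ d.contains k = false := by
  simp [PySem.Dict.get?, PySem.Dict.contains, List.find?_eq_none, List.any_eq_false]

-- keys of one A-step / one B-step: Set.add of the key
theorem pv_keys_stepA (d : PySem.Dict String (PySem.Set Int)) (w : String) (n : Int) :
    (if d.contains w then
        d.modify w PySem.Set.empty (fun s => PySem.Set.add s n)
      else d.insert w (PySem.Set.add PySem.Set.empty n)).keys
      = PySem.Set.add d.keys w := by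
  by_cases h : d.contains w = true
  · have hmem : w ∈ d.keys := (pv_contains_iff_mem_keys d w).mp h
    rw [if_pos h, PySem.Set.add_of_mem hmem]
    simp only [PySem.Dict.modify, PySem.Dict.insert, h, if_true, PySem.Dict.keys, List.map_map]
    apply List.map_congr_left
    intro p _
    by_cases hp : p.1 = w
    · simp [hp]
    · simp [hp]
  · have hb : d.contains w = false := by simpa using h
    have hmem : w ∉ d.keys := fun hm => h ((pv_contains_iff_mem_keys d w).mpr hm)
    rw [if_neg h, PySem.Set.add_of_not_mem hmem]
    simp [PySem.Dict.insert, hb, PySem.Dict.keys]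

theorem pv_keys_stepB (wls : List (List String)) (d : PySem.Dict String (PySem.Set Int))
    (w : String) : (pvStepB wls d w).keys = PySem.Set.add d.keys w := by
  unfold pvStepB
  by_cases h : d.contains w = true
  · have hmem : w ∈ d.keys := (pv_contains_iff_mem_keys d w).mp h
    rw [if_pos h, PySem.Set.add_of_mem hmem]
  · have hb : d.contains w = false := by simpa using h
    have hmem : w ∉ d.keys := fun hm => h ((pv_contains_iff_mem_keys d w).mpr hm)
    rw [if_neg h, PySem.Set.add_of_not_mem hmem]
    simp [PySem.Dict.insert, hb, PySem.Dict.keys]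

-- keys of the inner word loops
theorem pv_keys_innerA (words : List String) (d : PySem.Dict String (PySem.Set Int)) (n : Int) :
    (find_word_lines words d n).keys = words.foldl PySem.Set.add d.keys := by
  induction words generalizing d with
  | nil => rfl
  | cons w ws ih =>
      simp only [find_word_lines, List.foldl_cons] at *
      rw [ih, pv_keys_stepA]

theorem pv_keys_innerB (wls : List (List String)) (words : List String)
    (d : PySem.Dict String (PySem.Set Int)) :
    (words.foldl (pvStepB wls) d).keys = words.foldl PySem.Set.add d.keys := by
  induction words generalizing d with
  | nil => rfl
  | cons w ws ih =>
      simp only [List.foldl_cons]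
      rw [ih, pv_keys_stepB]

-- keys of the outer loops
theorem pv_keys_outerA (L : List (Int × List String)) (d : PySem.Dict String (PySem.Set Int)) :
    ((L.foldl (fun d p => find_word_lines p.2 d p.1) d)).keys
      = (L.map (·.2)).flatten.foldl PySem.Set.add d.keys := by
  induction L generalizing d with
  | nil => rfl
  | cons p L ih =>
      simp only [List.foldl_cons, List.map_cons, List.flatten_cons, List.foldl_append]
      rw [ih, pv_keys_innerA]

theorem pv_keys_outerB (wls : List (List String)) (xs : List (List String))
    (d : PySem.Dict String (PySem.Set Int)) :
    ((xs.foldl (fun d words => words.foldl (pvStepB wls) d) d)).keys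
      = xs.flatten.foldl PySem.Set.add d.keys := by
  induction xs generalizing d with
  | nil => rfl
  | cons ws xs ih =>
      simp only [List.foldl_cons, List.flatten_cons, List.foldl_append]
      rw [ih, pv_keys_innerB]

-- values on the A side: one step
theorem pv_getD_stepA (d : PySem.Dict String (PySem.Set Int)) (w q : String) (n : Int) :
    (if d.contains w then
        d.modify w PySem.Set.empty (fun s => PySem.Set.add s n)
      else d.insert w (PySem.Set.add PySem.Set.empty n)).getD q PySem.Set.empty
      = if q = w then PySem.Set.add (d.getD q PySem.Set.empty) n
        else d.getD q PySem.Set.empty := by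
  by_cases h : d.contains w = true
  · rw [if_pos h]
    by_cases hq : q = w
    · subst hq
      rw [if_pos rfl, PySem.Dict.getD_modify_self]
    · rw [if_neg hq, PySem.Dict.getD_modify_of_ne _ _ _ hq]
  · have hb : d.contains w = false := by simpa using h
    rw [if_neg h]
    by_cases hq : q = w
    · subst hq
      rw [if_pos rfl, PySem.Dict.getD_insert_self, pv_getD_of_not_contains d q _ hb]
    · rw [if_neg hq, PySem.Dict.getD_insert_of_ne _ _ _ hq]

-- values on the A side: one line
theorem pv_getD_innerA (words : List String) (d : PySem.Dict String (PySem.Set Int))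
    (n : Int) (q : String) :
    (find_word_lines words d n).getD q PySem.Set.empty
      = if words.contains q then PySem.Set.add (d.getD q PySem.Set.empty) n
        else d.getD q PySem.Set.empty := by
  induction words generalizing d with
  | nil => simp [find_word_lines]
  | cons w ws ih =>
      simp only [find_word_lines, List.foldl_cons] at *
      rw [ih, pv_getD_stepA]
      by_cases hq : q = w
      · subst hq
        by_cases hws : ws.contains q = true <;> simp_all
      · have hcons : ((w :: ws).contains q) = ws.contains q := by
          simp
          exact fun he => absurd he hq
        rw [hcons, if_neg hq]

-- values on the A side: the whole enumerated loop
theorem pv_getD_outerA (L : List (Int × List String)) (d : PySem.Dict String (PySem.Set Int))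
    (q : String) :
    ((L.foldl (fun d p => find_word_lines p.2 d p.1) d)).getD q PySem.Set.empty
      = (L.filter (fun p => p.2.contains q)).foldl
          (fun v p => PySem.Set.add v p.1) (d.getD q PySem.Set.empty) := by
  induction L generalizing d with
  | nil => rfl
  | cons p L ih =>
      simp only [List.foldl_cons]
      rw [ih, pv_getD_innerA]
      by_cases hc : p.2.contains q = true
      · rw [if_pos hc]
        simp only [List.filter_cons, hc, if_true, List.foldl_cons]
      · have hc' : p.2.contains q = false := by simpa using hc
        rw [if_neg hc]
        simp only [List.filter_cons, hc', Bool.false_eq_true, if_false]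

-- values on the B side: every stored value is the canonical set (invariant)
theorem pv_inv_innerB (wls : List (List String)) (words : List String)
    (d : PySem.Dict String (PySem.Set Int))
    (h : ∀ k, d.get? k = none ∨ d.get? k = some (pvOcc wls k)) :
    ∀ k, (words.foldl (pvStepB wls) d).get? k = none
      ∨ (words.foldl (pvStepB wls) d).get? k = some (pvOcc wls k) := by
  induction words generalizing d with
  | nil => exact h
  | cons w ws ih =>
      simp only [List.foldl_cons]
      apply ih
      intro k
      unfold pvStepB
      by_cases hc : d.contains w = true
      · rw [if_pos hc]; exact h k
      · rw [if_neg hc]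
        by_cases hk : k = w
        · subst hk
          right
          rw [PySem.Dict.get?_insert_self]
          rfl
        · rw [PySem.Dict.get?_insert_of_ne _ _ hk]
          exact h k

theorem pv_inv_outerB (wls : List (List String)) (xs : List (List String))
    (d : PySem.Dict String (PySem.Set Int))
    (h : ∀ k, d.get? k = none ∨ d.get? k = some (pvOcc wls k)) :
    ∀ k, (xs.foldl (fun d words => words.foldl (pvStepB wls) d) d).get? k = none
      ∨ (xs.foldl (fun d words => words.foldl (pvStepB wls) d) d).get? k = some (pvOcc wls k) := by
  induction xs generalizing d with
  | nil => exact h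
  | cons ws xs ih =>
      simp only [List.foldl_cons]
      exact ih _ (pv_inv_innerB wls ws d h)

-- A's counter-state fold re-stated over enumerate
theorem pv_outerA_counter (xs : List String) (d : PySem.Dict String (PySem.Set Int)) (n : Int) :
    (xs.foldl (fun (st : PySem.Dict String (PySem.Set Int) × Int) line =>
        let words := PySem.Str.split₀ (PySem.Str.lower (PySem.Str.strip line))
        (find_word_lines words st.1 st.2, st.2 + 1)) (d, n)).1
      = (PySem.List.enumerate xs n).foldl
          (fun d p => find_word_lines (pvWordsOf p.2) d p.1) d := by
  induction xs generalizing d n with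
  | nil => rfl
  | cons x xs ih =>
      rw [PySem.List.enumerate_cons]
      simp only [List.foldl_cons]
      rw [ih]
      rfl

-- enumerate commutes with map on the payload
theorem pv_enumerate_map (xs : List String) (f : String → List String) (n : Int) :
    PySem.List.enumerate (xs.map f) n
      = (PySem.List.enumerate xs n).map (fun p => (p.1, f p.2)) := by
  induction xs generalizing n with
  | nil => rfl
  | cons x xs ih =>
      simp only [List.map_cons, PySem.List.enumerate_cons, ih]

-- foldl of Set.add keeps keys duplicate-free
theorem pv_nodup_foldl_add (xs : List String) (s : PySem.Set String) (h : s.Nodup) :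
    (xs.foldl PySem.Set.add s).Nodup := by
  induction xs generalizing s with
  | nil => exact h
  | cons x xs ih => exact ih _ (PySem.Set.nodup_add s x h)

-- ===== VERDICT (by name: the statement is the Claim_ definition above) =====
theorem create_word_dict_spec : Claim_equal_create_word_dict := by
  intro file_lines _
  unfold Spec_create_word_dict create_word_dict create_word_dict_alt
  rw [pv_outerA_counter]
  set wls := file_lines.map (fun line => PySem.Str.split₀ (PySem.Str.lower (PySem.Str.strip line))) with hwls
  have hmapA :
      (PySem.List.enumerate file_lines 1).foldl
          (fun d p => find_word_lines (pvWordsOf p.2) d p.1) PySem.Dict.empty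
        = (PySem.List.enumerate wls 1).foldl
            (fun d p => find_word_lines p.2 d p.1) PySem.Dict.empty := by
    rw [hwls]
    show _ = (PySem.List.enumerate (file_lines.map pvWordsOf) 1).foldl
        (fun d p => find_word_lines p.2 d p.1) PySem.Dict.empty
    rw [pv_enumerate_map, List.foldl_map]
  rw [hmapA]
  set DA := (PySem.List.enumerate wls 1).foldl
      (fun d p => find_word_lines p.2 d p.1) PySem.Dict.empty with hDA
  set DB := wls.foldl (fun d words => words.foldl (pvStepB wls) d) PySem.Dict.empty with hDB
  show DA.items = DB.items
  -- keys agree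
  have hkeysA : DA.keys = wls.flatten.foldl PySem.Set.add [] := by
    rw [hDA, pv_keys_outerA]
    rw [PySem.List.map_snd_enumerate]
    rfl
  have hkeysB : DB.keys = wls.flatten.foldl PySem.Set.add [] := by
    rw [hDB, pv_keys_outerB]
    rfl
  have hkeys : DA.keys = DB.keys := by rw [hkeysA, hkeysB]
  have hnodup : DA.keys.Nodup := by
    rw [hkeysA]; exact pv_nodup_foldl_add _ _ List.nodup_nil
  -- every A value is the canonical set
  have hvalA : ∀ q, DA.getD q PySem.Set.empty = pvOcc wls q := by
    intro q
    rw [hDA, pv_getD_outerA]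
    have : (PySem.Dict.empty : PySem.Dict String (PySem.Set Int)).getD q PySem.Set.empty
        = PySem.Set.empty := rfl
    rw [this]
    unfold pvOcc
    rw [PySem.Set.ofList_eq_foldl, List.foldl_map]
    rfl
  -- every stored B value is the canonical set
  have hvalB : ∀ k, DB.get? k = none ∨ DB.get? k = some (pvOcc wls k) := by
    rw [hDB]
    exact pv_inv_outerB wls wls PySem.Dict.empty (fun k => Or.inl rfl)
  -- assemble items from keys
  rw [PySem.Dict.items_eq_map_keys DA hnodup PySem.Set.empty,
      PySem.Dict.items_eq_map_keys DB (hkeys ▸ hnodup) PySem.Set.empty, ← hkeys]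
  apply List.map_congr_left
  intro k hk
  have hcB : DB.contains k = true := (pv_contains_iff_mem_keys DB k).mpr (hkeys ▸ hk)
  have hgB : DB.getD k PySem.Set.empty = pvOcc wls k := by
    rcases hvalB k with h | h
    · exact absurd hcB (by rw [(pv_get?_eq_none_iff DB k).mp h]; simp)
    · simp [PySem.Dict.getD, h]
  rw [hvalA k, hgB]
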